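-- pv_equiv track=rewrite | github.com/birc-gsa-2022/project-1-python-team | src/align.py | align
-- ===== SOURCE A (Python) =====
-- def align(p: str, q: str, edits: str) -> "tuple[str, str]":
--     """Align two sequences from a sequence of edits.
--
--     Args:
--         p (str): The first sequence to align.
--         q (str): The second sequence to align
--         edits (str): The list of edits to apply, given as a string
--
--     Returns:
--         tuple[str, str]: The two rows in the pairwise alignment
--
--     >>> align("ACCACAGTCATA", "ACAGAGTACAAA", "MDMMMMMMIMMMM")
--     ('ACCACAGT-CATA', 'A-CAGAGTACAAA')
--
--     """
--     # FIXME: Compute the alignment rows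
--     left, right = '', ''
--     i, j = 0, 0
--     for edit in edits:
--         if edit == 'M':
--             left += p[i]
--             right += q[j]
--             i += 1
--             j += 1
--         elif edit == 'I':
--             left += '-'
--             right += q[j]
--             j += 1
--         elif edit == 'D':
--             left += p[i]
--             right += '-'
--             i += 1
--     return left, right
-- ===== SOURCE B (Python) =====
-- def align(p: str, q: str, edits: str) -> "tuple[str, str]":
--     # Build each alignment row in its own pass over the edit string.
--     left = []
--     i = 0
--     for e in edits:
--         if e == 'M' or e == 'D':
--             left.append(p[i])
--             i += 1
--         elif e == 'I':
--             left.append('-')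
--     right = []
--     j = 0
--     for e in edits:
--         if e == 'M' or e == 'I':
--             right.append(q[j])
--             j += 1
--         elif e == 'D':
--             right.append('-')
--     return ''.join(left), ''.join(right)
-- ===== Notes on version B (the rewrite author's own statement) =====
-- stated objective: alternative
-- what changed: B builds the two alignment rows in two independent passes over the edit string, each tracking only its own row and source index, instead of A's single interleaved pass maintaining both rows and both indices at once.
import Mathlib
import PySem

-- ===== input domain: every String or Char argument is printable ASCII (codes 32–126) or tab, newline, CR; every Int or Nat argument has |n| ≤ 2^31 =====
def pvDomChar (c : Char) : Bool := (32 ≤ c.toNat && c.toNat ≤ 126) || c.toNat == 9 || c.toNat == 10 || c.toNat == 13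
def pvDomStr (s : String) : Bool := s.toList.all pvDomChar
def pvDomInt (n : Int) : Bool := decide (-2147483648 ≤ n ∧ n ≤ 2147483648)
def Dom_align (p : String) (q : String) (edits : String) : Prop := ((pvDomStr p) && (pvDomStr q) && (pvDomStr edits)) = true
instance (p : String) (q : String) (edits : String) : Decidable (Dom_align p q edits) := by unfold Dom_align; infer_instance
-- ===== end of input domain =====

-- B builds each row in its own pass over the edits; equivalence is over inputs where A raises no IndexError.

-- ===== PORT A =====
-- one interleaved pass; state (left, right, i, j); p[i]/q[j] is in range on Pre_, getD's default is never used there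
def alignStep (pl ql : List Char) (st : List Char × List Char × Nat × Nat) (e : Char) :
    List Char × List Char × Nat × Nat :=
  let (l, r, i, j) := st
  if e = 'M' then (l ++ [pl.getD i ' '], r ++ [ql.getD j ' '], i + 1, j + 1)
  else if e = 'I' then (l ++ ['-'], r ++ [ql.getD j ' '], i, j + 1)
  else if e = 'D' then (l ++ [pl.getD i ' '], r ++ ['-'], i + 1, j)
  else st

def align (p : String) (q : String) (edits : String) : String × String :=
  let st := edits.toList.foldl (alignStep p.toList q.toList) ([], [], 0, 0)
  (String.mk st.1, String.mk st.2.1)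

-- ===== PORT B =====
-- first pass: the left row (consumes p on 'M'/'D', gap on 'I')
def leftStep (pl : List Char) (st : List Char × Nat) (e : Char) : List Char × Nat :=
  let (acc, i) := st
  if e = 'M' ∨ e = 'D' then (acc ++ [pl.getD i ' '], i + 1)
  else if e = 'I' then (acc ++ ['-'], i)
  else st

-- second pass: the right row (consumes q on 'M'/'I', gap on 'D')
def rightStep (ql : List Char) (st : List Char × Nat) (e : Char) : List Char × Nat :=
  let (acc, j) := st
  if e = 'M' ∨ e = 'I' then (acc ++ [ql.getD j ' '], j + 1)
  else if e = 'D' then (acc ++ ['-'], j)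
  else st

def align_alt (p : String) (q : String) (edits : String) : String × String :=
  let l := edits.toList.foldl (leftStep p.toList) ([], 0)
  let r := edits.toList.foldl (rightStep q.toList) ([], 0)
  (String.mk l.1, String.mk r.1)

-- ===== PRECONDITION & SPEC =====
-- Pre_ excludes exactly the inputs on which Python A raises IndexError: edit strings that
-- consume more characters of p ('M'/'D') or of q ('M'/'I') than are available.
def Pre_align (p : String) (q : String) (edits : String) : Prop :=
  edits.toList.count 'M' + edits.toList.count 'D' ≤ p.toList.length ∧
  edits.toList.count 'M' + edits.toList.count 'I' ≤ q.toList.length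
instance (p : String) (q : String) (edits : String) : Decidable (Pre_align p q edits) := by
  unfold Pre_align; infer_instance

def pvWitness_align : String × String × String := ("ACCACAGTCATA", "ACAGAGTACAAA", "MDMMMMMMIMMMM")

def Spec_align (p : String) (q : String) (edits : String) (out : String × String) : Prop := out = align_alt p q edits
instance (p : String) (q : String) (edits : String) (out : String × String) : Decidable (Spec_align p q edits out) := by unfold Spec_align; infer_instance

-- ===== CLAIM (what is proved, stated in full; the proofs are below) =====
def Claim_equal_align : Prop := ∀ (p : String) (q : String) (edits : String), Dom_align p q edits → Pre_align p q edits → Spec_align p q edits (align p q edits)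

-- ===== LEMMAS AND PROOFS =====

-- The interleaved fold is the product of the two one-row folds (left and right components
-- never read each other's state), for any starting state.
theorem foldl_align_split (pl ql : List Char) (es : List Char)
    (l r : List Char) (i j : Nat) :
    es.foldl (alignStep pl ql) (l, r, i, j) =
      ((es.foldl (leftStep pl) (l, i)).1,
       (es.foldl (rightStep ql) (r, j)).1,
       (es.foldl (leftStep pl) (l, i)).2,
       (es.foldl (rightStep ql) (r, j)).2) := by
  induction es generalizing l r i j with
  | nil => rfl
  | cons e es ih =>
    simp only [List.foldl_cons]
    by_cases hM : e = 'M'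
    · simp [alignStep, leftStep, rightStep, hM, ih]
    · by_cases hI : e = 'I'
      · simp [alignStep, leftStep, rightStep, hM, hI, ih]
      · by_cases hD : e = 'D'
        · simp [alignStep, leftStep, rightStep, hM, hI, hD, ih]
        · simp [alignStep, leftStep, rightStep, hM, hI, hD, ih]

-- ===== VERDICT (by name: the statement is the Claim_ definition above) =====
theorem align_spec : Claim_equal_align := by
  intro p q edits _ _
  unfold Spec_align align align_alt
  rw [foldl_align_split]
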